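-- pv_equiv track=rewrite | github.com/AlgoMathITMO/public-transport-network | ptn/preprocessing/osm.py | is_medicine
-- ===== SOURCE A (Python) =====
-- from typing import List, Tuple, Dict, Optional, Set
--
-- def is_any_pair_present(tags: dict, items: List[Tuple[str, str]]) -> bool:
--     return isinstance(tags, dict) \
--            and any((key, value) in items for key, value in tags.items())
--
-- def is_medicine(tags: dict) -> bool:
--     items = [
--         ('building', 'hospital'),
--     ]
--     items += [('shop', val) for val in ['pharmacy', 'optician', 'optics',
--                                         'medical_supply', 'healthcare', 'emergency']]
--     items += [('amenity', val) for val in ['pharmacy', 'hospital', 'clinic',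
--                                            'dentist', 'veterinary', 'healthcare',
--                                            'doctors', 'mortuary', 'crematorium', 'embassy']]
--
--     return is_any_pair_present(tags, items)
-- ===== SOURCE B (Python) =====
-- def is_medicine(tags: dict) -> bool:
--     if not isinstance(tags, dict):
--         return False
--     shop_vals = {'pharmacy', 'optician', 'optics', 'medical_supply',
--                  'healthcare', 'emergency'}
--     amenity_vals = {'pharmacy', 'hospital', 'clinic', 'dentist', 'veterinary',
--                     'healthcare', 'doctors', 'mortuary', 'crematorium', 'embassy'}
--     return (tags.get('building') == 'hospital'
--             or tags.get('shop') in shop_vals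
--             or tags.get('amenity') in amenity_vals)
-- ===== Notes on version B (the rewrite author's own statement) =====
-- stated objective: simpler
-- what changed: Replaces the loop over all tag entries testing each pair against a 17-element pair list with three direct keyed dict probes (get('building')/get('shop')/get('amenity')) against per-key value sets.
import Mathlib
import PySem

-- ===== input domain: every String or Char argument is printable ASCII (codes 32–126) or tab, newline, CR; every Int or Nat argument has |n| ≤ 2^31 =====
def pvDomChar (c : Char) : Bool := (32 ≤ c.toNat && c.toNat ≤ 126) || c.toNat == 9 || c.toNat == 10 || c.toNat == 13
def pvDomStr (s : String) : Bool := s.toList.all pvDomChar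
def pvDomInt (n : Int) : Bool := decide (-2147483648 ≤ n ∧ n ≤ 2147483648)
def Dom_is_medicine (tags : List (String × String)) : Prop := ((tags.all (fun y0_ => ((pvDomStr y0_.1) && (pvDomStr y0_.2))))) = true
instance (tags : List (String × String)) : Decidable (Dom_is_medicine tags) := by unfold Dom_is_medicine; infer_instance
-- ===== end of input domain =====

-- B replaces A's scan of every tag pair against a 17-element pair list with three
-- direct keyed lookups against per-key value sets (objective: simpler).

-- ===== PORT A =====
def is_any_pair_present (tags : List (String × String)) (items : List (String × String)) : Bool :=
  -- isinstance(tags, dict) is always true under the type convention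
  tags.any (fun kv => items.contains kv)

def is_medicine (tags : List (String × String)) : Bool :=
  let items : List (String × String) := [("building", "hospital")]
  let items := items ++ (["pharmacy", "optician", "optics",
                          "medical_supply", "healthcare", "emergency"].map (fun v => ("shop", v)))
  let items := items ++ (["pharmacy", "hospital", "clinic",
                          "dentist", "veterinary", "healthcare",
                          "doctors", "mortuary", "crematorium", "embassy"].map (fun v => ("amenity", v)))
  is_any_pair_present tags items

-- ===== PORT B =====
def pvShopVals : List String :=
  ["pharmacy", "optician", "optics", "medical_supply", "healthcare", "emergency"]
def pvAmenityVals : List String :=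
  ["pharmacy", "hospital", "clinic", "dentist", "veterinary",
   "healthcare", "doctors", "mortuary", "crematorium", "embassy"]

def is_medicine_alt (tags : List (String × String)) : Bool :=
  ((PySem.Dict.mk tags).get? "building" == some "hospital")
  || (match (PySem.Dict.mk tags).get? "shop" with
      | some v => pvShopVals.contains v
      | none => false)
  || (match (PySem.Dict.mk tags).get? "amenity" with
      | some v => pvAmenityVals.contains v
      | none => false)

-- ===== PRECONDITION & SPEC =====
-- Pre_ excludes association lists with duplicate keys: those represent no Python
-- dict (A's parameter is a dict, whose keys are unique), so nothing is claimed there.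
def Pre_is_medicine (tags : List (String × String)) : Prop :=
  (tags.map Prod.fst).Nodup
instance (tags : List (String × String)) : Decidable (Pre_is_medicine tags) := by
  unfold Pre_is_medicine; infer_instance

def pvWitness_is_medicine : (List (String × String)) :=
  [("amenity", "clinic"), ("name", "x")]

def Spec_is_medicine (tags : List (String × String)) (out : Bool) : Prop := out = is_medicine_alt tags
instance (tags : List (String × String)) (out : Bool) : Decidable (Spec_is_medicine tags out) := by unfold Spec_is_medicine; infer_instance

-- ===== CLAIM (what is proved, stated in full; the proofs are below) =====
def Claim_equal_is_medicine : Prop := ∀ (tags : List (String × String)), Dom_is_medicine tags → Pre_is_medicine tags → Spec_is_medicine tags (is_medicine tags)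

-- ===== LEMMAS AND PROOFS =====

theorem get?_mk_none_of_not_mem (t : List (String × String)) (k : String)
    (h : k ∉ t.map Prod.fst) : (PySem.Dict.mk t).get? k = none := by
  induction t with
  | nil => rfl
  | cons p rest ih =>
    obtain ⟨a, b⟩ := p
    simp only [List.map_cons, List.mem_cons, not_or] at h
    have hne : ¬(a = k) := fun hh => h.1 hh.symm
    rw [PySem.Dict.get?_mk_cons]
    simp [beq_iff_eq, hne, ih h.2]

theorem contains_items_eq (k v : String) :
    ((([("building", "hospital")] ++ (["pharmacy", "optician", "optics",
        "medical_supply", "healthcare", "emergency"].map (fun v => ("shop", v)))) ++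
        (["pharmacy", "hospital", "clinic", "dentist", "veterinary", "healthcare",
          "doctors", "mortuary", "crematorium", "embassy"].map (fun v => ("amenity", v)))) :
        List (String × String)).contains (k, v)
    = ((k == "building" && v == "hospital")
       || (k == "shop" && pvShopVals.contains v)
       || (k == "amenity" && pvAmenityVals.contains v)) := by
  simp [pvShopVals, pvAmenityVals, List.contains_eq_mem, Prod.ext_iff]
  by_cases hb : k = "building" <;> by_cases hs : k = "shop" <;> by_cases ha : k = "amenity" <;>
    simp_all <;> tauto

theorem main_eq (tags : List (String × String)) (h : Pre_is_medicine tags) :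
    is_medicine tags = is_medicine_alt tags := by
  unfold Pre_is_medicine at h
  unfold is_medicine is_medicine_alt is_any_pair_present
  induction tags with
  | nil => rfl
  | cons p rest ih =>
    obtain ⟨k, v⟩ := p
    simp only [List.map_cons, List.nodup_cons] at h
    obtain ⟨hk, hrest⟩ := h
    rw [List.any_cons, contains_items_eq, ih hrest]
    rw [PySem.Dict.get?_mk_cons, PySem.Dict.get?_mk_cons, PySem.Dict.get?_mk_cons]
    by_cases hb : k = "building" <;> by_cases hs : k = "shop" <;> by_cases ha : k = "amenity"
    all_goals simp_all
    · rw [get?_mk_none_of_not_mem rest "building" (by simp_all)]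
      cases PySem.Dict.get? (PySem.Dict.mk rest) "shop" <;>
        cases PySem.Dict.get? (PySem.Dict.mk rest) "amenity" <;>
        simp [Bool.or_assoc, Bool.or_comm, Bool.or_left_comm]
    · rw [get?_mk_none_of_not_mem rest "shop" (by simp_all)]
      cases PySem.Dict.get? (PySem.Dict.mk rest) "building" <;>
        cases PySem.Dict.get? (PySem.Dict.mk rest) "amenity" <;>
        simp [Bool.or_assoc, Bool.or_comm, Bool.or_left_comm]
    · rw [get?_mk_none_of_not_mem rest "amenity" (by simp_all)]
      cases PySem.Dict.get? (PySem.Dict.mk rest) "building" <;>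
        cases PySem.Dict.get? (PySem.Dict.mk rest) "shop" <;>
        simp [Bool.or_assoc, Bool.or_comm, Bool.or_left_comm]

-- ===== VERDICT (by name: the statement is the Claim_ definition above) =====
theorem is_medicine_spec : Claim_equal_is_medicine := by
  intro tags _ hpre
  exact main_eq tags hpre
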